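-- pv_equiv track=rewrite | github.com/TheRoD2k/PythonContests_DIHT | CONTEST_5/B/source.py | find_minimum_addition
-- ===== SOURCE A (Python) =====
-- def check_if_poly(line):
--     for i in range(0, len(line)//2):
--         if line[i] != line[len(line)-1-i]:
--             return False
--     return True
--
-- def remove_first_symbol(line):
--     new_line = ""
--     for i in range(1, len(line)):
--         new_line += line[i]
--     return new_line
--
-- def find_minimum_addition(line):
--     addition = line[::-1]
--     answer = len(line)
--     for i in range(len(line)+1):
--         if check_if_poly(line + addition):
--             answer = len(line)-i
--         addition = remove_first_symbol(addition)
--     return answer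
-- ===== SOURCE B (Python) =====
-- def find_minimum_addition(line):
--     n = len(line)
--     for k in range(n + 1):
--         suffix = line[k:]
--         if suffix == suffix[::-1]:
--             return k
--     return n  # unreachable: the empty suffix is a palindrome
-- ===== Notes on version B (the rewrite author's own statement) =====
-- stated objective: faster
-- what changed: Instead of rebuilding and re-checking line+addition for every shrinking addition (a full O(n) palindrome scan on an O(n) rebuilt string, n+1 times, with remove_first_symbol itself O(n)), B returns the first k whose suffix line[k:] is a palindrome, using one slice comparison per k with early exit.
import Mathlib
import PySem

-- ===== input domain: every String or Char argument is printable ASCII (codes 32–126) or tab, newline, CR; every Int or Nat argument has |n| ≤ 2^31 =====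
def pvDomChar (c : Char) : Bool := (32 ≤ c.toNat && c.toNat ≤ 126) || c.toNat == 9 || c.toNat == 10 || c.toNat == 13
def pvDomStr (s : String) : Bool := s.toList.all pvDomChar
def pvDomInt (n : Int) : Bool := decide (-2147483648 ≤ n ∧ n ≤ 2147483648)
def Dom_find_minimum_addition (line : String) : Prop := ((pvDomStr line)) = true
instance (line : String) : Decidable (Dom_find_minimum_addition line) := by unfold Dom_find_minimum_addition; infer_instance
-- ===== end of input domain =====

-- B replaces A's rebuild-and-rescan of line+addition for every shrinking addition by returning
-- the first k whose suffix line[k:] equals its own reverse (early exit); objective: faster.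

-- ===== PORT A =====
-- helper check_if_poly: loop over range(0, len(line)//2) with early return False
def pvCheckGo (line : List Char) : List Int → Bool
  | [] => true
  | i :: rest =>
    if PySem.List.pyGet? line i ≠ PySem.List.pyGet? line ((line.length : Int) - 1 - i) then false
    else pvCheckGo line rest

def check_if_poly (line : List Char) : Bool :=
  pvCheckGo line (PySem.List.pyRange 0 (PySem.Int.floordiv (line.length : Int) 2))

-- helper remove_first_symbol: new_line = ""; for i in range(1, len(line)): new_line += line[i]
def remove_first_symbol (line : List Char) : List Char :=
  List.foldl (fun acc i => acc ++ [PySem.List.pyGetD line i ' ']) []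
    (PySem.List.pyRange 1 (line.length : Int))

def find_minimum_addition (line : String) : Int :=
  let l := line.toList
  let addition := l.reverse           -- line[::-1]
  let n := l.length
  (List.foldl
    (fun (st : Int × List Char) (i : Int) =>
      (if check_if_poly (l ++ st.2) then (n : Int) - i else st.1,
       remove_first_symbol st.2))
    ((n : Int), addition)
    (PySem.List.pyRange 0 ((n : Int) + 1))).1

-- ===== PORT B =====
-- for k in range(n+1): suffix = line[k:]; if suffix == suffix[::-1]: return k  (return n unreachable)
def pvAltGo (l : List Char) (k : Nat) : Int :=
  let suffix := l.drop k
  if suffix = suffix.reverse then (k : Int)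
  else if k < l.length then pvAltGo l (k + 1) else (l.length : Int)
termination_by l.length - k

def find_minimum_addition_alt (line : String) : Int := pvAltGo line.toList 0

-- ===== PRECONDITION & SPEC =====
def Spec_find_minimum_addition (line : String) (out : Int) : Prop := out = find_minimum_addition_alt line
instance (line : String) (out : Int) : Decidable (Spec_find_minimum_addition line out) := by unfold Spec_find_minimum_addition; infer_instance

-- ===== CLAIM (what is proved, stated in full; the proofs are below) =====
def Claim_equal_find_minimum_addition : Prop := ∀ (line : String), Dom_find_minimum_addition line → Spec_find_minimum_addition line (find_minimum_addition line)

-- ===== LEMMAS AND PROOFS =====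

-- the palindromicity test both sides reduce to: line[k:] equals its reverse
def pvPal (l : List Char) (k : Nat) : Bool := decide (l.drop k = (l.drop k).reverse)

-- check_if_poly's half scan is exactly "the list equals its reverse"
lemma pvCheckGo_iff (l : List Char) (idxs : List Int) :
    pvCheckGo l idxs = true ↔
      ∀ i ∈ idxs, PySem.List.pyGet? l i = PySem.List.pyGet? l ((l.length : Int) - 1 - i) := by
  induction idxs with
  | nil => simp [pvCheckGo]
  | cons i rest ih =>
    by_cases h : PySem.List.pyGet? l i = PySem.List.pyGet? l ((l.length : Int) - 1 - i) <;>
      simp [pvCheckGo, h, ih]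

-- half-scan in Nat form
lemma half_iff (l : List Char) :
    (∀ j : Nat, j < l.length / 2 → l[j]? = l[l.length - 1 - j]?) ↔ l = l.reverse := by
  constructor
  · intro H
    apply List.ext_getElem?
    intro j
    by_cases hj : j < l.length
    · rw [List.getElem?_reverse hj]
      by_cases h1 : j < l.length / 2
      · exact H j h1
      · by_cases h2 : l.length - 1 - j < l.length / 2
        · have h3 : l.length - 1 - (l.length - 1 - j) = j := by omega
          have := (H _ h2).symm
          rwa [h3] at this
        · have : j = l.length - 1 - j := by omega
          rw [← this]
    · rw [List.getElem?_eq_none (by omega), List.getElem?_eq_none (by simpa using (by omega : l.length ≤ j))]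
  · intro H j hj
    have hj' : j < l.length := by omega
    rw [← List.getElem?_reverse hj', ← H]

lemma check_if_poly_iff (l : List Char) : check_if_poly l = true ↔ l = l.reverse := by
  rw [check_if_poly, pvCheckGo_iff, ← half_iff]
  have hfd : PySem.Int.floordiv (l.length : Int) 2 = ((l.length / 2 : Nat) : Int) := by
    exact_mod_cast PySem.Int.floordiv_natCast l.length 2
  rw [hfd]
  constructor
  · intro H j hj
    have h0 : ((j : Int)) ∈ PySem.List.pyRange 0 ((l.length / 2 : Nat) : Int) := by
      rw [PySem.List.mem_pyRange_one]; omega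
    have := H _ h0
    have hc : (l.length : Int) - 1 - (j : Int) = ((l.length - 1 - j : Nat) : Int) := by omega
    rw [hc, PySem.List.pyGet?_natCast, PySem.List.pyGet?_natCast] at this
    exact this
  · intro H i hi
    rw [PySem.List.mem_pyRange_one] at hi
    obtain ⟨h0, h1⟩ := hi
    obtain ⟨j, rfl⟩ := Int.eq_ofNat_of_zero_le h0
    have hj : j < l.length / 2 := by exact_mod_cast h1
    have hc : (l.length : Int) - 1 - (j : Int) = ((l.length - 1 - j : Nat) : Int) := by omega
    rw [hc, PySem.List.pyGet?_natCast, PySem.List.pyGet?_natCast]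
    exact H j hj

-- remove_first_symbol drops the first character
lemma map_pyGetD_range (l : List Char) (d : Nat) :
    ∀ k, l.length - k ≤ d →
      (PySem.List.pyRange (k : Int) (l.length : Int)).map (fun i => PySem.List.pyGetD l i ' ')
        = l.drop k := by
  induction d with
  | zero =>
    intro k hk
    have h1 : PySem.List.pyRange (k : Int) (l.length : Int) = [] := by
      apply List.eq_nil_iff_forall_not_mem.mpr
      intro x hx
      rw [PySem.List.mem_pyRange_one] at hx
      omega
    rw [h1, List.drop_eq_nil_of_le (by omega), List.map_nil]
  | succ d ih =>
    intro k hk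
    by_cases h : k < l.length
    · rw [PySem.List.pyRange_one_cons (by exact_mod_cast h), List.map_cons]
      have hc : (k : Int) + 1 = ((k + 1 : Nat) : Int) := by omega
      rw [hc, ih (k + 1) (by omega), PySem.List.pyGetD_natCast,
        List.getD_eq_getElem l ' ' h, List.drop_eq_getElem_cons h]
    · have h1 : PySem.List.pyRange (k : Int) (l.length : Int) = [] := by
        apply List.eq_nil_iff_forall_not_mem.mpr
        intro x hx
        rw [PySem.List.mem_pyRange_one] at hx
        omega
      rw [h1, List.drop_eq_nil_of_le (by omega), List.map_nil]

lemma remove_first_symbol_eq (l : List Char) : remove_first_symbol l = l.drop 1 := by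
  rw [remove_first_symbol, PySem.List.foldl_append_singleton_eq_map, List.nil_append]
  have := map_pyGetD_range l l.length 1 (by omega)
  simpa using this

-- the appended check A performs at step i is palindromicity of the suffix from n - i
lemma pal_append_aux (t d : List Char) :
    ((t ++ d) ++ t.reverse = ((t ++ d) ++ t.reverse).reverse) ↔ (d = d.reverse) := by
  simp only [List.reverse_append, List.reverse_reverse, List.append_assoc]
  rw [List.append_right_inj, List.append_left_inj]

lemma append_pal (l : List Char) (m : Nat) (_hm : m ≤ l.length) :
    (l ++ l.reverse.drop m = (l ++ l.reverse.drop m).reverse) ↔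
      (l.drop (l.length - m) = (l.drop (l.length - m)).reverse) := by
  have hdr : l.reverse.drop m = (l.take (l.length - m)).reverse := List.drop_reverse
  have h0 : l ++ (l.take (l.length - m)).reverse
      = (l.take (l.length - m) ++ l.drop (l.length - m)) ++ (l.take (l.length - m)).reverse := by
    rw [List.take_append_drop]
  rw [hdr, h0, pal_append_aux]

-- last-overwrite fold = last element of the filtered, mapped list
lemma foldl_if_last (q : Int → Bool) (c : Int → Int) (is : List Int) (a : Int) :
    List.foldl (fun a i => if q i then c i else a) a is
      = (List.map c (is.filter q)).getLastD a := by
  induction is generalizing a with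
  | nil => rfl
  | cons i rest ih =>
    rw [List.foldl_cons]
    by_cases h : q i = true
    · rw [if_pos h, ih, List.filter_cons_of_pos h, List.map_cons, List.getLastD_cons]
    · rw [if_neg h, ih, List.filter_cons_of_neg (by simpa using h)]

-- A's paired fold, with the addition component resolved to l.reverse.drop m
lemma main_fold (l : List Char) (m : Nat) (a : Int) (hm : m ≤ l.length + 1) :
    (List.foldl
      (fun (st : Int × List Char) (i : Int) =>
        (if check_if_poly (l ++ st.2) then (l.length : Int) - i else st.1,
         remove_first_symbol st.2))
      (a, l.reverse.drop m)
      (PySem.List.pyRange (m : Int) ((l.length : Int) + 1))).1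
    = List.foldl
        (fun a i => if check_if_poly (l ++ l.reverse.drop i.toNat) then (l.length : Int) - i else a)
        a (PySem.List.pyRange (m : Int) ((l.length : Int) + 1)) := by
  have key : ∀ (d m : Nat) (a : Int), m ≤ l.length + 1 → l.length + 1 - m ≤ d →
      (List.foldl
        (fun (st : Int × List Char) (i : Int) =>
          (if check_if_poly (l ++ st.2) then (l.length : Int) - i else st.1,
           remove_first_symbol st.2))
        (a, l.reverse.drop m)
        (PySem.List.pyRange (m : Int) ((l.length : Int) + 1))).1
      = List.foldl
          (fun a i => if check_if_poly (l ++ l.reverse.drop i.toNat) then (l.length : Int) - i else a)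
          a (PySem.List.pyRange (m : Int) ((l.length : Int) + 1)) := by
    intro d
    induction d with
    | zero =>
      intro m a hm hd
      have h1 : PySem.List.pyRange (m : Int) ((l.length : Int) + 1) = [] := by
        apply List.eq_nil_iff_forall_not_mem.mpr
        intro x hx
        rw [PySem.List.mem_pyRange_one] at hx
        omega
      rw [h1]
      rfl
    | succ d ih =>
      intro m a hm hd
      by_cases h : m < l.length + 1
      · rw [PySem.List.pyRange_one_cons (by omega : (m : Int) < (l.length : Int) + 1)]
        rw [List.foldl_cons, List.foldl_cons]
        have hc : (m : Int) + 1 = ((m + 1 : Nat) : Int) := by omega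
        have htn : ((m : Int)).toNat = m := Int.toNat_natCast m
        rw [remove_first_symbol_eq, List.drop_drop, htn]
        rw [hc] at *
        exact ih (m + 1) _ (by omega) (by omega)
      · have h1 : PySem.List.pyRange (m : Int) ((l.length : Int) + 1) = [] := by
          apply List.eq_nil_iff_forall_not_mem.mpr
          intro x hx
          rw [PySem.List.mem_pyRange_one] at hx
          omega
        rw [h1]
        rfl
  exact key (l.length + 1 - m) m a hm le_rfl

-- B's loop returns the first k in [k0, n] whose suffix is a palindrome
lemma pvAltGo_pos (l : List Char) (k : Nat) (h : l.drop k = (l.drop k).reverse) :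
    pvAltGo l k = (k : Int) := by
  rw [pvAltGo]
  exact if_pos h

lemma pvAltGo_neg (l : List Char) (k : Nat) (h : ¬ (l.drop k = (l.drop k).reverse))
    (hlt : k < l.length) : pvAltGo l k = pvAltGo l (k + 1) := by
  rw [pvAltGo]
  rw [if_neg h, if_pos hlt]

lemma pvAltGo_eq (l : List Char) (k : Nat) (hk : k ≤ l.length) :
    pvAltGo l k
      = ((((List.range' k (l.length + 1 - k)).filter (pvPal l)).headD l.length : Nat) : Int) := by
  have key : ∀ (d k : Nat), k ≤ l.length → l.length - k ≤ d →
      pvAltGo l k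
        = ((((List.range' k (l.length + 1 - k)).filter (pvPal l)).headD l.length : Nat) : Int) := by
    intro d
    induction d with
    | zero =>
      intro k hk hd
      have hke : k = l.length := by omega
      subst hke
      have hpal : l.drop l.length = (l.drop l.length).reverse := by
        rw [List.drop_eq_nil_of_le le_rfl]; rfl
      have hp : pvPal l l.length = true := decide_eq_true hpal
      have hr : l.length + 1 - l.length = 0 + 1 := by omega
      rw [pvAltGo_pos l l.length hpal, hr, List.range'_succ,
        List.filter_cons_of_pos hp]
      rfl
    | succ d ih =>
      intro k hk hd
      have hr : l.length + 1 - k = (l.length - k) + 1 := by omega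
      by_cases hpal : l.drop k = (l.drop k).reverse
      · have hp : pvPal l k = true := decide_eq_true hpal
        rw [pvAltGo_pos l k hpal, hr, List.range'_succ, List.filter_cons_of_pos hp]
        rfl
      · have hkl : k < l.length := by
          rcases Nat.lt_or_ge k l.length with h | h
          · exact h
          · exact absurd (by rw [List.drop_eq_nil_of_le (by omega)]; rfl) hpal
        have hp : pvPal l k = false := decide_eq_false hpal
        rw [pvAltGo_neg l k hpal hkl, hr, List.range'_succ, List.filter_cons_of_neg (by rw [hp]; simp)]
        rw [ih (k + 1) (by omega) (by omega)]
        have h2 : l.length + 1 - (k + 1) = l.length - k := by omega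
        rw [h2]
  exact key (l.length - k) k hk le_rfl

-- ===== VERDICT (by name: the statement is the Claim_ definition above) =====
theorem find_minimum_addition_spec : Claim_equal_find_minimum_addition := by
  intro line _hd
  unfold Spec_find_minimum_addition find_minimum_addition find_minimum_addition_alt
  set l := line.toList with hl
  set n := l.length with hn
  show (List.foldl
      (fun (st : Int × List Char) (i : Int) =>
        (if check_if_poly (l ++ st.2) then (n : Int) - i else st.1, remove_first_symbol st.2))
      ((n : Int), l.reverse)
      (PySem.List.pyRange 0 ((n : Int) + 1))).1 = pvAltGo l 0
  have h0 : l.reverse = l.reverse.drop 0 := rfl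
  have hc0 : (0 : Int) = ((0 : Nat) : Int) := rfl
  rw [h0, hc0, main_fold l 0 _ (by omega),
    foldl_if_last (fun i => check_if_poly (l ++ l.reverse.drop i.toNat))
      (fun i => (n : Int) - i)]
  have hcast : ((n : Int) + 1) = ((n + 1 : Nat) : Int) := by push_cast; ring
  rw [hcast, Nat.cast_zero, PySem.List.pyRange_zero_natCast, List.filter_map]
  have hfc : List.filter
        ((fun i : Int => check_if_poly (l ++ l.reverse.drop i.toNat)) ∘ (fun k : Nat => (k : Int)))
        (List.range (n + 1))
      = List.filter (fun j => pvPal l (n - j)) (List.range (n + 1)) := by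
    apply List.filter_congr
    intro j hj
    rw [List.mem_range] at hj
    have hj' : j ≤ n := by omega
    show check_if_poly (l ++ l.reverse.drop ((j : Int)).toNat) = pvPal l (n - j)
    rw [Int.toNat_natCast]
    by_cases hq : l.drop (n - j) = (l.drop (n - j)).reverse
    · rw [pvPal, decide_eq_true hq]
      exact (check_if_poly_iff _).mpr ((append_pal l j hj').mpr hq)
    · rw [pvPal, decide_eq_false hq]
      cases hcc : check_if_poly (l ++ l.reverse.drop j)
      · rfl
      · exact absurd ((append_pal l j hj').mp ((check_if_poly_iff _).mp hcc)) hq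
  rw [hfc, List.map_map]
  have hmap : List.map ((fun i : Int => (n : Int) - i) ∘ (fun k : Nat => (k : Int)))
        (List.filter (fun j => pvPal l (n - j)) (List.range (n + 1)))
      = List.map (fun k : Nat => (k : Int))
          (List.map (fun j => n - j) (List.filter (fun j => pvPal l (n - j)) (List.range (n + 1)))) := by
    rw [List.map_map]
    apply List.map_congr_left
    intro j hj
    have hj' : j ≤ n := by
      have := List.mem_range.mp (List.mem_of_mem_filter hj)
      omega
    show (n : Int) - (j : Int) = ((n - j : Nat) : Int)
    omega
  rw [hmap]
  have hcomp : (fun j => pvPal l (n - j)) = (pvPal l) ∘ (fun j : Nat => n - j) := rfl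
  rw [hcomp, ← List.filter_map]
  have hrev : List.map (fun j : Nat => n - j) (List.range (n + 1)) = (List.range (n + 1)).reverse := by
    rw [List.range_eq_range', List.reverse_range', ← List.range_eq_range']
    apply List.map_congr_left
    intro x hx
    omega
  rw [hrev, List.filter_reverse, List.map_reverse, List.getLastD_eq_getLast?,
    List.getLast?_reverse, List.head?_map]
  rw [pvAltGo_eq l 0 (by omega), Nat.sub_zero, ← List.range_eq_range',
    List.headD_eq_head?]
  cases (List.filter (pvPal l) (List.range (n + 1))).head? <;> simp [hn]
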